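-- pv_equiv track=rewrite | github.com/PavitarK/daily-leetcode | 6. Zigzag Conversion.py | fill_array
-- ===== SOURCE A (Python) =====
-- def fill_array(s, numLetters, numRows, numDiagonal, scramble):
--     s = list(s)
--     letter = 0
--     next_start = 0
--
--     while letter <= numLetters - 1:
--         column = next_start
--         for i in range(numRows):
--             scramble[i][column] = s[letter]
--             letter += 1
--             if letter > numLetters-1:
--                 return scramble
--
--         column += 1
--         row = numRows - 2
--         for i in range(numDiagonal):
--             scramble[row][column] = s[letter]
--             row -=1
--             column +=1
--             letter += 1
--             if letter > numLetters-1: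
--                 return scramble
--
--         next_start = column
-- ===== SOURCE B (Python) =====
-- def fill_array(s, numLetters, numRows, numDiagonal, scramble):
--     if numLetters <= 0:
--         return None
--     period = numRows + numDiagonal
--     for k in range(numLetters):
--         q, r = divmod(k, period)
--         base = q * (numDiagonal + 1)
--         ch = s[k]
--         if r < numRows:
--             scramble[r][base] = ch
--         else:
--             d = r - numRows
--             scramble[numRows - 2 - d][base + 1 + d] = ch
--     return scramble
-- ===== Notes on version B (the rewrite author's own statement) =====
-- stated objective: alternative
-- what changed: B replaces A's stateful two-phase zigzag walk (vertical run then diagonal run, carrying letter/row/column/next_start across an outer while loop) with a single pass that computes each letter's (row, column) directly by divmod arithmetic on its index against the zigzag period.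
import Mathlib
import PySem

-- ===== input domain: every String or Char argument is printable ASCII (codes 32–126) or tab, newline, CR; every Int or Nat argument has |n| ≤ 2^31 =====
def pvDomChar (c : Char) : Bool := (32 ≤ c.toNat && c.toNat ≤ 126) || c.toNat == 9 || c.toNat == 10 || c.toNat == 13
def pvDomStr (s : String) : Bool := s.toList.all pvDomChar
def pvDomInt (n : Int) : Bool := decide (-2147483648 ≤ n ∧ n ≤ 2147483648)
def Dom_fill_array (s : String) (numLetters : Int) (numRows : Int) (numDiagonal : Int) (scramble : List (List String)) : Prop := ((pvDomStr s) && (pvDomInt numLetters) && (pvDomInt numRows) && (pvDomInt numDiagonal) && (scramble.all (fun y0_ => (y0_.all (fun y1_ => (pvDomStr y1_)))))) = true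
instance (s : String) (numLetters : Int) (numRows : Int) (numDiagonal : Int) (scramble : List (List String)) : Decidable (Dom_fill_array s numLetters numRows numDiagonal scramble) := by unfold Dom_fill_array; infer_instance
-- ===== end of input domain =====

-- B replaces A's two-phase sequential zigzag walk with a per-letter arithmetic placement
-- (divmod by the period); equivalence is about the RETURN value, but both programs also
-- perform the identical in-place writes to `scramble` in the same order.

-- shared primitive: Python's `g[i][c] = v` (nested IndexError semantics, negative wrap)
def pvSet2? (g : List (List String)) (i c : Int) (v : String) : Option (List (List String)) :=
  match PySem.List.pyGet? g i with
  | none => none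
  | some row =>
    match PySem.List.pySet? row c v with
    | none => none
    | some row' => some (PySem.List.pySetD g i row')

-- ===== PORT A =====
-- the `for i in range(numRows)` vertical phase; .inl = early `return scramble`
def pvVertA (chars : List String) (L col : Int) :
    List Int → List (List String) → Int → Option ((List (List String)) ⊕ ((List (List String)) × Int))
  | [], g, letter => some (.inr (g, letter))
  | i :: rest, g, letter =>
    match PySem.List.pyGet? chars letter with
    | none => none
    | some v =>
      match pvSet2? g i col v with
      | none => none
      | some g' =>
        if letter + 1 > L - 1 then some (.inl g')
        else pvVertA chars L col rest g' (letter + 1)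

-- the `for i in range(numDiagonal)` diagonal phase
def pvDiagA (chars : List String) (L : Int) :
    List Int → List (List String) → Int → Int → Int → Option ((List (List String)) ⊕ ((List (List String)) × Int × Int))
  | [], g, _row, col, letter => some (.inr (g, col, letter))
  | _ :: rest, g, row, col, letter =>
    match PySem.List.pyGet? chars letter with
    | none => none
    | some v =>
      match pvSet2? g row col v with
      | none => none
      | some g' =>
        if letter + 1 > L - 1 then some (.inl g')
        else pvDiagA chars L rest g' (row - 1) (col + 1) (letter + 1)

-- the `while letter <= numLetters - 1` loop; fuel only makes the (excluded) divergent case total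
def pvLoopA (chars : List String) (L nR nD : Int) :
    Nat → List (List String) → Int → Int → Option (List (List String))
  | 0, _, _, _ => none
  | fuel + 1, g, letter, next_start =>
    if letter ≤ L - 1 then
      match pvVertA chars L next_start (PySem.List.pyRange 0 nR 1) g letter with
      | none => none
      | some (.inl g') => some g'
      | some (.inr (g', letter')) =>
        match pvDiagA chars L (PySem.List.pyRange 0 nD 1) g' (nR - 2) (next_start + 1) letter' with
        | none => none
        | some (.inl g'') => some g''
        | some (.inr (g'', col, letter'')) => pvLoopA chars L nR nD fuel g'' letter'' col
    else none  -- falls off the end: Python returns None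

def fill_array (s : String) (numLetters : Int) (numRows : Int) (numDiagonal : Int) (scramble : List (List String)) : Option (List (List String)) :=
  pvLoopA (s.toList.map (fun c => String.mk [c])) numLetters numRows numDiagonal
    (numLetters.toNat + 1) scramble 0 0

-- ===== PORT B =====
def pvPlaceB (chars : List String) (nR nD p : Int) :
    List Int → List (List String) → Option (List (List String))
  | [], g => some g
  | k :: rest, g =>
    match PySem.Int.divmod? k p with
    | none => none
    | some qr =>
      let base := qr.1 * (nD + 1)
      match PySem.List.pyGet? chars k with
      | none => none
      | some ch =>
        let rc : Int × Int :=
          if qr.2 < nR then (qr.2, base)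
          else (nR - 2 - (qr.2 - nR), base + 1 + (qr.2 - nR))
        match pvSet2? g rc.1 rc.2 ch with
        | none => none
        | some g' => pvPlaceB chars nR nD p rest g'

def fill_array_alt (s : String) (numLetters : Int) (numRows : Int) (numDiagonal : Int) (scramble : List (List String)) : Option (List (List String)) :=
  if numLetters ≤ 0 then none
  else pvPlaceB (s.toList.map (fun c => String.mk [c])) numRows numDiagonal
         (numRows + numDiagonal) (PySem.List.pyRange 0 numLetters 1) scramble

-- ===== PRECONDITION & SPEC =====
-- (row, col) where letter k is placed
def pvPos (nR nD p k : Int) : Int × Int :=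
  let q := PySem.Int.floordiv k p
  let r := PySem.Int.mod k p
  if r < nR then (r, q * (nD + 1)) else (nR - 2 - (r - nR), q * (nD + 1) + 1 + (r - nR))

def pvWriteOK (g : List (List String)) (rc : Int × Int) : Bool :=
  match PySem.List.pyGet? g rc.1 with
  | none => false
  | some row => decide (PySem.Raise.InRange row.length rc.2)

-- Pre_ restricts to the natural domain of nonnegative numRows/numDiagonal (for negative
-- counts A diverges, raises, or returns via accidental column arithmetic that no caller
-- would specify), requires numRows+numDiagonal > 0 when letters remain (else A loops
-- forever), and excludes the inputs where A raises IndexError (s shorter than numLetters,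
-- or some placement lands outside the grid).
def Pre_fill_array (s : String) (numLetters : Int) (numRows : Int) (numDiagonal : Int) (scramble : List (List String)) : Prop :=
  numLetters ≤ 0 ∨
  (0 ≤ numRows ∧ 0 ≤ numDiagonal ∧ 0 < numRows + numDiagonal ∧
   numLetters ≤ (s.toList.length : Int) ∧
   ∀ k ∈ List.range numLetters.toNat,
     pvWriteOK scramble (pvPos numRows numDiagonal (numRows + numDiagonal) (k : Int)) = true)

instance (s : String) (numLetters : Int) (numRows : Int) (numDiagonal : Int) (scramble : List (List String)) : Decidable (Pre_fill_array s numLetters numRows numDiagonal scramble) := by unfold Pre_fill_array; infer_instance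

def pvWitness_fill_array : String × Int × Int × Int × List (List String) :=
  ("abcd", 4, 2, 1, [["x", "y", "z"], ["x", "y", "z"]])

def Spec_fill_array (s : String) (numLetters : Int) (numRows : Int) (numDiagonal : Int) (scramble : List (List String)) (out : Option (List (List String))) : Prop := out = fill_array_alt s numLetters numRows numDiagonal scramble
instance (s : String) (numLetters : Int) (numRows : Int) (numDiagonal : Int) (scramble : List (List String)) (out : Option (List (List String))) : Decidable (Spec_fill_array s numLetters numRows numDiagonal scramble out) := by unfold Spec_fill_array; infer_instance

-- ===== CLAIM (what is proved, stated in full; the proofs are below) =====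
def Claim_equal_fill_array : Prop := ∀ (s : String) (numLetters : Int) (numRows : Int) (numDiagonal : Int) (scramble : List (List String)), Dom_fill_array s numLetters numRows numDiagonal scramble → Pre_fill_array s numLetters numRows numDiagonal scramble → Spec_fill_array s numLetters numRows numDiagonal scramble (fill_array s numLetters numRows numDiagonal scramble)

-- ===== LEMMAS AND PROOFS =====

-- common executor: perform the writes (letter, row, col) in order
def pvExec (chars : List String) : List (Int × Int × Int) → List (List String) → Option (List (List String))
  | [], g => some g
  | (l, r, c) :: rest, g =>
    match PySem.List.pyGet? chars l with
    | none => none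
    | some v =>
      match pvSet2? g r c v with
      | none => none
      | some g' => pvExec chars rest g'

theorem pvExec_append (chars : List String) (l1 l2 : List (Int × Int × Int)) (g : List (List String)) :
    pvExec chars (l1 ++ l2) g = (pvExec chars l1 g).bind (pvExec chars l2) := by
  induction l1 generalizing g with
  | nil => simp [pvExec]
  | cons x rest ih =>
    obtain ⟨l, r, c⟩ := x
    simp only [List.cons_append, pvExec]
    cases hg : PySem.List.pyGet? chars l with
    | none => simp [hg]
    | some v =>
      cases hs : pvSet2? g r c v with
      | none => simp [hg, hs]
      | some g' => simp only [hg, hs]; exact ih g'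

def pvWOf (nR nD p : Int) (k : Int) : Int × Int × Int :=
  (k, (pvPos nR nD p k).1, (pvPos nR nD p k).2)

-- B's loop is the executor over its own positions
theorem pvPlaceB_eq_exec (chars : List String) (nR nD p : Int) (hp : p ≠ 0) :
    ∀ (ks : List Int) (g : List (List String)),
      pvPlaceB chars nR nD p ks g = pvExec chars (ks.map (pvWOf nR nD p)) g := by
  intro ks
  induction ks with
  | nil => intro g; simp [pvPlaceB, pvExec]
  | cons k rest ih =>
    intro g
    have hdm : PySem.Int.divmod? k p =
        some (PySem.Int.floordiv k p, PySem.Int.mod k p) := by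
      simp [PySem.Int.divmod?, PySem.Int.floordiv, PySem.Int.mod, hp]
    simp only [pvPlaceB, hdm, List.map_cons, pvExec, pvWOf, pvPos]
    cases hg : PySem.List.pyGet? chars k with
    | none => by_cases h : PySem.Int.mod k p < nR <;> simp [h]
    | some v =>
      by_cases h : PySem.Int.mod k p < nR
      · simp only [h, if_true]
        cases hs : pvSet2? g (PySem.Int.mod k p)
            (PySem.Int.floordiv k p * (nD + 1)) v with
        | none => simp
        | some g' => simp [ih]
      · simp only [h, if_false]
        cases hs : pvSet2? g (nR - 2 - (PySem.Int.mod k p - nR))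
            (PySem.Int.floordiv k p * (nD + 1) + 1 + (PySem.Int.mod k p - nR)) v with
        | none => simp
        | some g' => simp [ih]

-- the vertical phase is the executor over rows at a fixed column
def pvZipV (col : Int) : Int → List Int → List (Int × Int × Int)
  | _, [] => []
  | l, i :: rest => (l, i, col) :: pvZipV col (l + 1) rest

-- the diagonal phase ignores the range elements; only the count matters
def pvZipD : Int → Int → Int → List Int → List (Int × Int × Int)
  | _, _, _, [] => []
  | l, r, c, _ :: rest => (l, r, c) :: pvZipD (l + 1) (r - 1) (c + 1) rest

theorem pvVertA_eq_exec (chars : List String) (L col : Int) :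
    ∀ (rows : List Int) (l : Int) (g : List (List String)), l ≤ L - 1 →
      pvVertA chars L col rows g l =
        if L ≤ l + (rows.length : Int) then
          Option.map Sum.inl (pvExec chars (pvZipV col l (rows.take (L - l).toNat)) g)
        else
          Option.map (fun g' => Sum.inr (g', l + (rows.length : Int)))
            (pvExec chars (pvZipV col l rows) g) := by
  intro rows
  induction rows with
  | nil =>
    intro l g hl
    have hcond : ¬ L ≤ l := by omega
    simp [pvVertA, pvZipV, pvExec, hcond]
  | cons i rest ih =>
    intro l g hl
    have htake : (i :: rest).take (L - l).toNat = i :: rest.take (L - (l + 1)).toNat := by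
      have h1 : (L - l).toNat = (L - (l + 1)).toNat + 1 := by omega
      simp [h1]
    rw [htake]
    simp only [pvVertA, pvZipV, pvExec, List.length_cons, Nat.cast_add, Nat.cast_one]
    cases hg : PySem.List.pyGet? chars l with
    | none => simp [hg]
    | some v =>
      simp only [hg]
      cases hs : pvSet2? g i col v with
      | none => simp [hs]
      | some g' =>
        simp only [hs]
        by_cases hend : l + 1 > L - 1
        · have hc : L ≤ l + ((rest.length : Int) + 1) := by omega
          have hz : (L - (l + 1)).toNat = 0 := by omega
          simp [hend, hc, hz, pvZipV, pvExec]
        · rw [if_neg hend, ih (l + 1) g' (by omega)]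
          have e : l + ((rest.length : Int) + 1) = l + 1 + (rest.length : Int) := by ring
          rw [e]

theorem pvDiagA_eq_exec (chars : List String) (L : Int) :
    ∀ (rows : List Int) (l r c : Int) (g : List (List String)), l ≤ L - 1 →
      pvDiagA chars L rows g r c l =
        if L ≤ l + (rows.length : Int) then
          Option.map Sum.inl (pvExec chars (pvZipD l r c (rows.take (L - l).toNat)) g)
        else
          Option.map (fun g' => Sum.inr (g', c + (rows.length : Int), l + (rows.length : Int)))
            (pvExec chars (pvZipD l r c rows) g) := by
  intro rows
  induction rows with
  | nil =>
    intro l r c g hl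
    have hcond : ¬ L ≤ l := by omega
    simp [pvDiagA, pvZipD, pvExec, hcond]
  | cons i rest ih =>
    intro l r c g hl
    have htake : (i :: rest).take (L - l).toNat = i :: rest.take (L - (l + 1)).toNat := by
      have h1 : (L - l).toNat = (L - (l + 1)).toNat + 1 := by omega
      simp [h1]
    rw [htake]
    simp only [pvDiagA, pvZipD, pvExec, List.length_cons, Nat.cast_add, Nat.cast_one]
    cases hg : PySem.List.pyGet? chars l with
    | none => simp [hg]
    | some v =>
      simp only [hg]
      cases hs : pvSet2? g r c v with
      | none => simp [hs]
      | some g' =>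
        simp only [hs]
        by_cases hend : l + 1 > L - 1
        · have hc : L ≤ l + ((rest.length : Int) + 1) := by omega
          have hz : (L - (l + 1)).toNat = 0 := by omega
          simp [hend, hc, hz, pvZipD, pvExec]
        · rw [if_neg hend, ih (l + 1) (r - 1) (c + 1) g' (by omega)]
          have e1 : l + ((rest.length : Int) + 1) = l + 1 + (rest.length : Int) := by ring
          have e2 : c + ((rest.length : Int) + 1) = c + 1 + (rest.length : Int) := by ring
          rw [e1, e2]

theorem pvMapRangeShift {α : Type} (f : Nat → α) (n : Nat) :
    (List.range (n + 1)).map f = f 0 :: (List.range n).map (fun j => f (j + 1)) := by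
  rw [List.range_succ_eq_map, List.map_cons, List.map_map]
  rfl

theorem pvZipV_range (col : Int) : ∀ (t : Nat) (a l : Int),
    pvZipV col l ((List.range t).map (fun (j : Nat) => a + (j : Int))) =
      (List.range t).map (fun (j : Nat) => (l + (j : Int), a + (j : Int), col)) := by
  intro t
  induction t with
  | zero => intro a l; simp [pvZipV]
  | succ t ih =>
    intro a l
    rw [pvMapRangeShift, pvMapRangeShift]
    simp only [pvZipV, Nat.cast_zero, add_zero]
    have h1 : ((List.range t).map fun (j : Nat) => a + ((j + 1 : Nat) : Int)) =
        (List.range t).map (fun (j : Nat) => (a + 1) + (j : Int)) := by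
      apply List.map_congr_left; intro j _; push_cast; ring
    rw [h1, ih (a + 1) (l + 1)]
    congr 1
    apply List.map_congr_left; intro j _
    simp only [Prod.mk.injEq]
    exact ⟨by push_cast; ring, by push_cast; ring, trivial⟩

theorem pvZipD_len : ∀ (rows : List Int) (l r c : Int),
    pvZipD l r c rows =
      (List.range rows.length).map (fun (j : Nat) => (l + (j : Int), r - (j : Int), c + (j : Int))) := by
  intro rows
  induction rows with
  | nil => intro l r c; simp [pvZipD]
  | cons i rest ih =>
    intro l r c
    rw [List.length_cons, pvMapRangeShift]
    simp only [pvZipD, Nat.cast_zero, add_zero, sub_zero]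
    rw [ih (l + 1) (r - 1) (c + 1)]
    congr 1
    apply List.map_congr_left; intro j _
    simp only [Prod.mk.injEq]
    refine ⟨by push_cast; ring, by push_cast; ring, by push_cast; ring⟩

-- arithmetic: where letter c*p + j lands
theorem pvPos_vert (nR nD p c j : Int) (hp : p = nR + nD) (hnR : 0 ≤ nR) (hnD : 0 ≤ nD)
    (hpos : 0 < p) (hj0 : 0 ≤ j) (hj : j < nR) :
    pvPos nR nD p (c * p + j) = (j, c * (nD + 1)) := by
  have hq : PySem.Int.floordiv (c * p + j) p = c := by
    rw [PySem.Int.floordiv_eq_iff_of_pos hpos]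
    constructor
    · omega
    · have : (c + 1) * p = c * p + p := by ring
      omega
  have hr : PySem.Int.mod (c * p + j) p = j := by
    have := PySem.Int.floordiv_mul_add_mod (c * p + j) p
    rw [hq] at this; omega
  simp [pvPos, hq, hr, hj]

theorem pvPos_diag (nR nD p c j : Int) (hp : p = nR + nD) (hnR : 0 ≤ nR) (hnD : 0 ≤ nD)
    (hpos : 0 < p) (hj0 : 0 ≤ j) (hj : j < nD) :
    pvPos nR nD p (c * p + nR + j) = (nR - 2 - j, c * (nD + 1) + 1 + j) := by
  have hq : PySem.Int.floordiv (c * p + nR + j) p = c := by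
    rw [PySem.Int.floordiv_eq_iff_of_pos hpos]
    constructor
    · omega
    · have : (c + 1) * p = c * p + p := by ring
      omega
  have hr : PySem.Int.mod (c * p + nR + j) p = nR + j := by
    have := PySem.Int.floordiv_mul_add_mod (c * p + nR + j) p
    rw [hq] at this; omega
  have hge : ¬ (nR + j < nR) := by omega
  simp only [pvPos, hq, hr, hge, if_false, Prod.mk.injEq]
  refine ⟨by ring, by ring⟩

-- B's write list for letters m, m+1, …, m+t-1
def pvTgt (nR nD p m : Int) (t : Nat) : List (Int × Int × Int) :=
  (List.range t).map (fun (j : Nat) => pvWOf nR nD p (m + (j : Int)))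

theorem pvTgt_split (nR nD p m : Int) (t1 t2 : Nat) :
    pvTgt nR nD p m (t1 + t2) = pvTgt nR nD p m t1 ++ pvTgt nR nD p (m + (t1 : Int)) t2 := by
  unfold pvTgt
  rw [List.range_add, List.map_append, List.map_map]
  congr 1
  apply List.map_congr_left; intro j _
  simp only [Function.comp_apply]
  congr 1
  push_cast; ring

theorem pvVert_list (nR nD p c : Int) (hp : p = nR + nD) (hnR : 0 ≤ nR) (hnD : 0 ≤ nD)
    (hpos : 0 < p) (t : Nat) (ht : (t : Int) ≤ nR) :
    pvZipV (c * (nD + 1)) (c * p) ((List.range t).map (fun (j : Nat) => (0 : Int) + (j : Int))) =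
      pvTgt nR nD p (c * p) t := by
  rw [pvZipV_range]
  unfold pvTgt
  apply List.map_congr_left; intro j hj
  have hjt : j < t := List.mem_range.mp hj
  unfold pvWOf
  rw [pvPos_vert nR nD p c (j : Int) hp hnR hnD hpos (by positivity) (by omega)]
  simp

theorem pvDiag_list (nR nD p c : Int) (hp : p = nR + nD) (hnR : 0 ≤ nR) (hnD : 0 ≤ nD)
    (hpos : 0 < p) (t : Nat) (ht : (t : Int) ≤ nD) (rows : List Int) (hlen : rows.length = t) :
    pvZipD (c * p + nR) (nR - 2) (c * (nD + 1) + 1) rows = pvTgt nR nD p (c * p + nR) t := by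
  rw [pvZipD_len, hlen]
  unfold pvTgt
  apply List.map_congr_left; intro j hj
  have hjt : j < t := List.mem_range.mp hj
  unfold pvWOf
  rw [show c * p + nR + (j : Int) = c * p + nR + (j : Int) from rfl,
    pvPos_diag nR nD p c (j : Int) hp hnR hnD hpos (by positivity) (by omega)]

-- the outer while loop executes B's write list from letter c*p on
theorem pvLoopA_eq_exec (chars : List String) (L nR nD p : Int) (hp : p = nR + nD)
    (hnR : 0 ≤ nR) (hnD : 0 ≤ nD) (hpos : 0 < p) :
    ∀ (fuel : Nat) (c : Int) (g : List (List String)), 0 ≤ c → c * p ≤ L - 1 →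
      (L - c * p).toNat ≤ fuel →
      pvLoopA chars L nR nD fuel g (c * p) (c * (nD + 1)) =
        pvExec chars (pvTgt nR nD p (c * p) (L - c * p).toNat) g := by
  intro fuel
  induction fuel with
  | zero => intro c g hc hcl hfuel; exfalso; omega
  | succ fuel ih =>
    intro c g hc hcl hfuel
    have hR : PySem.List.pyRange 0 nR 1 = (List.range nR.toNat).map (fun (j : Nat) => (0 : Int) + (j : Int)) := by
      rw [PySem.List.pyRange_one]; norm_num
    have hD : PySem.List.pyRange 0 nD 1 = (List.range nD.toNat).map (fun (j : Nat) => (0 : Int) + (j : Int)) := by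
      rw [PySem.List.pyRange_one]; norm_num
    have hRlen : (((PySem.List.pyRange 0 nR 1).length : Nat) : Int) = nR := by
      rw [hR]; simp; omega
    have hDlen : (((PySem.List.pyRange 0 nD 1).length : Nat) : Int) = nD := by
      rw [hD]; simp; omega
    simp only [pvLoopA, if_pos hcl]
    rw [pvVertA_eq_exec chars L (c * (nD + 1)) (PySem.List.pyRange 0 nR 1) (c * p) g hcl]
    by_cases h1 : L ≤ c * p + (((PySem.List.pyRange 0 nR 1).length : Nat) : Int)
    · rw [if_pos h1]
      have ht : (L - c * p).toNat ≤ nR.toNat := by rw [hRlen] at h1; omega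
      have htake : (PySem.List.pyRange 0 nR 1).take (L - c * p).toNat
          = (List.range (L - c * p).toNat).map (fun (j : Nat) => (0 : Int) + (j : Int)) := by
        rw [hR, ← List.map_take, List.take_range]
        congr 2
        omega
      rw [htake, pvVert_list nR nD p c hp hnR hnD hpos (L - c * p).toNat (by rw [hRlen] at h1; omega)]
      cases hx : pvExec chars (pvTgt nR nD p (c * p) (L - c * p).toNat) g <;> simp [hx]
    · rw [if_neg h1]
      rw [hRlen]
      have hgt1 : c * p + nR < L := by rw [hRlen] at h1; omega
      have hlistV : pvZipV (c * (nD + 1)) (c * p) (PySem.List.pyRange 0 nR 1)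
          = pvTgt nR nD p (c * p) nR.toNat := by
        rw [hR]; exact pvVert_list nR nD p c hp hnR hnD hpos nR.toNat (by omega)
      rw [hlistV]
      have hsplit1 : (L - c * p).toNat = nR.toNat + (L - (c * p + nR)).toNat := by omega
      rw [hsplit1, pvTgt_split, pvExec_append,
        show ((nR.toNat : Nat) : Int) = nR from by omega]
      cases hx : pvExec chars (pvTgt nR nD p (c * p) nR.toNat) g with
      | none => simp [hx]
      | some g1 =>
        simp only [hx, Option.map_some, Option.bind_some]
        have hl' : c * p + nR ≤ L - 1 := by omega
        rw [pvDiagA_eq_exec chars L (PySem.List.pyRange 0 nD 1) (c * p + nR) (nR - 2)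
          (c * (nD + 1) + 1) g1 hl']
        by_cases h2 : L ≤ c * p + nR + (((PySem.List.pyRange 0 nD 1).length : Nat) : Int)
        · rw [if_pos h2]
          have hgt2 : L ≤ c * p + nR + nD := by rw [hDlen] at h2; omega
          have htake2len : ((PySem.List.pyRange 0 nD 1).take (L - (c * p + nR)).toNat).length
              = (L - (c * p + nR)).toNat := by
            rw [List.length_take, hD]
            simp
            omega
          rw [pvDiag_list nR nD p c hp hnR hnD hpos (L - (c * p + nR)).toNat (by omega)
            _ htake2len]
          cases hy : pvExec chars (pvTgt nR nD p (c * p + nR) (L - (c * p + nR)).toNat) g1 <;>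
            simp [hy]
        · rw [if_neg h2]
          rw [hDlen]
          have hgt2 : c * p + nR + nD < L := by rw [hDlen] at h2; omega
          have hc1p : (c + 1) * p = c * p + p := by ring
          have hlistD : pvZipD (c * p + nR) (nR - 2) (c * (nD + 1) + 1) (PySem.List.pyRange 0 nD 1)
              = pvTgt nR nD p (c * p + nR) nD.toNat :=
            pvDiag_list nR nD p c hp hnR hnD hpos nD.toNat (by omega) _ (by rw [hD]; simp)
          rw [hlistD]
          have hsplit2 : (L - (c * p + nR)).toNat = nD.toNat + (L - (c + 1) * p).toNat := by
            omega
          rw [hsplit2, pvTgt_split, pvExec_append,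
            show ((nD.toNat : Nat) : Int) = nD from by omega,
            show c * p + nR + nD = (c + 1) * p from by rw [hc1p, hp]; ring]
          cases hy : pvExec chars (pvTgt nR nD p (c * p + nR) nD.toNat) g1 with
          | none => simp [hy]
          | some g2 =>
            simp only [hy, Option.map_some, Option.bind_some]
            rw [show c * (nD + 1) + 1 + nD = (c + 1) * (nD + 1) from by ring]
            exact ih (c + 1) g2 (by omega) (by omega) (by omega)

theorem fill_array_spec : Claim_equal_fill_array := by
  intro s L nR nD g hdom hpre
  unfold Spec_fill_array fill_array fill_array_alt
  by_cases hL0 : L ≤ 0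
  · have hLt : L.toNat = 0 := by omega
    have h01 : ¬ ((0 : Int) ≤ L - 1) := by omega
    rw [hLt, if_pos hL0]
    simp only [pvLoopA]
    rw [if_neg h01]
  · rcases hpre with h | ⟨hnR, hnD, hpos, _, _⟩
    · omega
    rw [if_neg hL0]
    have hpne : nR + nD ≠ 0 := by omega
    rw [pvPlaceB_eq_exec (s.toList.map (fun c => String.mk [c])) nR nD (nR + nD) hpne]
    have hRL : (PySem.List.pyRange 0 L 1).map (pvWOf nR nD (nR + nD))
        = pvTgt nR nD (nR + nD) 0 L.toNat := by
      rw [PySem.List.pyRange_one]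
      simp only [List.map_map, pvTgt]
      have : (L - 0).toNat = L.toNat := by omega
      rw [this]
      apply List.map_congr_left; intro j _
      simp [Function.comp]
    rw [hRL]
    have hmain := pvLoopA_eq_exec (s.toList.map (fun c => String.mk [c])) L nR nD (nR + nD)
      rfl hnR hnD hpos (L.toNat + 1) 0 g le_rfl (by simp only [zero_mul]; omega) (by simp only [zero_mul]; omega)
    simp only [zero_mul, Int.sub_zero] at hmain
    exact hmain
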